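-- pv_equiv track=rewrite | github.com/raulminan/rosalind_solutions | exercises/BA_ch1/BA1F.py | minimum_skew
-- ===== SOURCE A (Python) =====
-- def minimum_skew(genome: str) -> str:
--     """Defines the skew of a DNA string, denoted skew(genome) as the difference
--     between the total number of occurrences of "G" and "C" in Genome
--
--     Let Prefix_i(genome) denote the prefix (i.e., initial subtring) of genome of
--     length i
--
--     Parameters
--     ----------
--     genome : str
--         A DNA string
--
--     Returns
--     -------
--     str
--         all integers i minimizing skew(prefix_i(genome)) over all values of i from
--         0 to len(genome) in a string
--
--     Example
--     --------
--     skew(prefix_i("CATGGGCATCGGCCATACGCC")) are: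
--     0 -1 -1 -1 0 1 2 1 1 1 0 1 2 1 0 0 0 0 -1 0 -1 -2
--     """
--     skew = [0] # first value is always 0, since its the skew for a subtring with
--                # length 0
--     c_count = 0
--     g_count = 0
--     for i in range(0, len(genome)):
--         if genome[i] == "C":
--             c_count += 1
--         elif genome[i] == "G":
--             g_count += 1
--         skew.append(g_count-c_count)
--
--     indices = [str(i) for i, x in enumerate(skew) if x == min(skew)]
--     return " ".join(indices)
-- ===== SOURCE B (Python) =====
-- def minimum_skew(genome: str) -> str:
--     skew = 0
--     best = 0
--     result = [0]
--     for i, ch in enumerate(genome, 1):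
--         if ch == "G":
--             skew += 1
--         elif ch == "C":
--             skew -= 1
--         if skew < best:
--             best = skew
--             result = [i]
--         elif skew == best:
--             result.append(i)
--     return " ".join(map(str, result))
-- ===== Notes on version B (the rewrite author's own statement) =====
-- stated objective: faster
-- what changed: B replaces A's build-full-skew-array-then-filter (with min(skew) re-evaluated for every element of the comprehension) by a single pass that maintains the running prefix skew, the minimum seen so far, and the list of indices achieving it.
import Mathlib
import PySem

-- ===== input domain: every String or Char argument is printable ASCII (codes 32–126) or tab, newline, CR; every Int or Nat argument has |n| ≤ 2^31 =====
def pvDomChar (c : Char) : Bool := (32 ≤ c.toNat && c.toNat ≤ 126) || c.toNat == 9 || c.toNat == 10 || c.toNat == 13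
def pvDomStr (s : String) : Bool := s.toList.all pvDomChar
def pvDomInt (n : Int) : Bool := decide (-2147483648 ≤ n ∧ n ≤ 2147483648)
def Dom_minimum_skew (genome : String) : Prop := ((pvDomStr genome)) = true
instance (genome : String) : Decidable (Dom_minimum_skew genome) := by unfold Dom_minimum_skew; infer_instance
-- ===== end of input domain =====

-- B replaces A's full skew array + per-element min(skew) rescan by a single pass keeping the
-- running skew, the minimum so far and the indices achieving it (objective: faster).

-- ===== PORT A =====
-- the for-loop of A: appends each prefix skew to the list, threading c_count/g_count
def pvA_loop : List Char → List Int → Int → Int → List Int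
  | [], skew, _, _ => skew
  | ch :: rest, skew, c, g =>
    if ch = 'C' then pvA_loop rest (skew ++ [g - (c + 1)]) (c + 1) g
    else if ch = 'G' then pvA_loop rest (skew ++ [(g + 1) - c]) c (g + 1)
    else pvA_loop rest (skew ++ [g - c]) c g

def minimum_skew (genome : String) : String :=
  let skew := pvA_loop genome.toList [0] 0 0
  -- min(skew): skew always starts with 0 so min? is some; getD 0 is never the default
  let indices := (PySem.List.enumerate skew 0).filterMap
    (fun p => if p.2 = (PySem.List.min? skew (fun x => x)).getD 0
              then some (PySem.Int.toStr p.1) else none)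
  PySem.Str.join " " indices

-- ===== PORT B =====
-- single pass: i = 1-based position, skew = running prefix skew, best = minimum so far,
-- res = indices achieving best (ascending)
def pvB_loop : List Char → Int → Int → Int → List Int → List Int
  | [], _, _, _, res => res
  | ch :: rest, i, skew, best, res =>
    let skew := if ch = 'G' then skew + 1 else if ch = 'C' then skew - 1 else skew
    if skew < best then pvB_loop rest (i + 1) skew skew [i]
    else if skew = best then pvB_loop rest (i + 1) skew best (res ++ [i])
    else pvB_loop rest (i + 1) skew best res

def minimum_skew_alt (genome : String) : String :=
  PySem.Str.join " " ((pvB_loop genome.toList 1 0 0 [0]).map PySem.Int.toStr)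

-- ===== PRECONDITION & SPEC =====
def Spec_minimum_skew (genome : String) (out : String) : Prop := out = minimum_skew_alt genome
instance (genome : String) (out : String) : Decidable (Spec_minimum_skew genome out) := by unfold Spec_minimum_skew; infer_instance

-- ===== CLAIM (what is proved, stated in full; the proofs are below) =====
def Claim_equal_minimum_skew : Prop := ∀ (genome : String), Dom_minimum_skew genome → Spec_minimum_skew genome (minimum_skew genome)

-- ===== LEMMAS AND PROOFS =====

-- min of a snoc'd list, through min?_id_cons
lemma min?_id_append_singleton (xs : List Int) (m v : Int)
    (h : PySem.List.min? xs (fun x => x) = some m) :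
    PySem.List.min? (xs ++ [v]) (fun x => x) = some (min m v) := by
  cases xs with
  | nil => simp [PySem.List.min?] at h
  | cons x t =>
    rw [PySem.List.min?_id_cons] at h
    rw [List.cons_append, PySem.List.min?_id_cons, List.foldl_append]
    rw [Option.some_inj] at h ⊢
    rw [List.foldl_cons, List.foldl_nil, h]

-- the index extraction over a snoc'd skew list
lemma indices_append (xs : List Int) (v m : Int) :
    (PySem.List.enumerate (xs ++ [v]) 0).filterMap
      (fun p => if p.2 = m then some p.1 else none)
    = (PySem.List.enumerate xs 0).filterMap
        (fun p => if p.2 = m then some p.1 else none)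
      ++ (if v = m then [(xs.length : Int)] else []) := by
  rw [PySem.List.enumerate_append, List.filterMap_append]
  rw [PySem.List.enumerate_cons, PySem.List.enumerate_nil]
  simp only [List.filterMap_cons, List.filterMap_nil, zero_add]
  by_cases h : v = m <;> simp [h]

-- no index qualifies when the target is below the minimum
lemma indices_nil_of_lt (xs : List Int) (m v : Int)
    (h : PySem.List.min? xs (fun x => x) = some m) (hv : v < m) :
    (PySem.List.enumerate xs 0).filterMap
      (fun p => if p.2 = v then some p.1 else none) = [] := by
  rw [List.filterMap_eq_nil_iff]
  intro p hp
  rw [PySem.List.mem_enumerate_iff] at hp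
  obtain ⟨k, hk, rfl⟩ := hp
  have hm : m ≤ xs[k] := PySem.List.min?_isMin h _ (List.getElem_mem hk)
  have hne : xs[k] ≠ v := by omega
  simp [hne]

-- loop invariant: running A's loop from any state (skew list, counts) and then extracting
-- the min/indices equals running B's loop from the corresponding state
lemma loop_key (rest : List Char) : ∀ (skew : List Int) (c g best : Int) (res : List Int),
    PySem.List.min? skew (fun x => x) = some best →
    res = (PySem.List.enumerate skew 0).filterMap
      (fun p => if p.2 = best then some p.1 else none) →
    (PySem.List.enumerate (pvA_loop rest skew c g) 0).filterMap
      (fun p => if p.2 = (PySem.List.min? (pvA_loop rest skew c g) (fun x => x)).getD 0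
                then some p.1 else none)
    = pvB_loop rest (skew.length : Int) (g - c) best res := by
  induction rest with
  | nil =>
    intro skew c g best res hmin hres
    simp [pvA_loop, pvB_loop, hmin, hres]
  | cons ch rest ih =>
    intro skew c g best res hmin hres
    -- the new appended skew value is the same in both loops
    have hlen : ((skew ++ [0]).length : Int) = (skew.length : Int) + 1 := by simp
    by_cases hC : ch = 'C'
    · -- skew decreases by 1
      simp only [pvA_loop, pvB_loop, hC, Char.reduceEq, reduceIte]
      set v : Int := g - (c + 1) with hv
      rcases lt_trichotomy v best with hlt | heq | hgt
      · rw [ih (skew ++ [v]) (c + 1) g v [(skew.length : Int)]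
            (by rw [min?_id_append_singleton skew best v hmin]; congr 1; omega)
            (by rw [indices_append, indices_nil_of_lt skew best v hmin hlt]; simp)]
        simp only [List.length_append, List.length_singleton]
        push_cast
        have : g - c - 1 = v := by omega
        rw [this]
        rw [if_pos (by omega)]
      · rw [ih (skew ++ [v]) (c + 1) g best (res ++ [(skew.length : Int)])
            (by rw [min?_id_append_singleton skew best v hmin]; congr 1; omega)
            (by rw [indices_append, hres]; simp [heq])]
        simp only [List.length_append, List.length_singleton]
        push_cast
        have : g - c - 1 = v := by omega
        rw [this, if_neg (by omega), if_pos (by omega)]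
      · rw [ih (skew ++ [v]) (c + 1) g best res
            (by rw [min?_id_append_singleton skew best v hmin]; congr 1; omega)
            (by rw [indices_append, hres, if_neg (by omega)]; simp)]
        simp only [List.length_append, List.length_singleton]
        push_cast
        have : g - c - 1 = v := by omega
        rw [this, if_neg (by omega), if_neg (by omega)]
    · by_cases hG : ch = 'G'
      · -- skew increases by 1
        simp only [pvA_loop, pvB_loop, hG, Char.reduceEq, reduceIte]
        set v : Int := (g + 1) - c with hv
        rcases lt_trichotomy v best with hlt | heq | hgt
        · rw [ih (skew ++ [v]) c (g + 1) v [(skew.length : Int)]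
              (by rw [min?_id_append_singleton skew best v hmin]; congr 1; omega)
              (by rw [indices_append, indices_nil_of_lt skew best v hmin hlt]; simp)]
          simp only [List.length_append, List.length_singleton]
          push_cast
          have : g - c + 1 = v := by omega
          rw [this, if_pos (by omega)]
        · rw [ih (skew ++ [v]) c (g + 1) best (res ++ [(skew.length : Int)])
              (by rw [min?_id_append_singleton skew best v hmin]; congr 1; omega)
              (by rw [indices_append, hres]; simp [heq])]
          simp only [List.length_append, List.length_singleton]
          push_cast
          have : g - c + 1 = v := by omega
          rw [this, if_neg (by omega), if_pos (by omega)]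
        · rw [ih (skew ++ [v]) c (g + 1) best res
              (by rw [min?_id_append_singleton skew best v hmin]; congr 1; omega)
              (by rw [indices_append, hres, if_neg (by omega)]; simp)]
          simp only [List.length_append, List.length_singleton]
          push_cast
          have : g - c + 1 = v := by omega
          rw [this, if_neg (by omega), if_neg (by omega)]
      · -- skew unchanged
        simp only [pvA_loop, pvB_loop, if_neg hC, if_neg hG]
        set v : Int := g - c with hv
        rcases lt_trichotomy v best with hlt | heq | hgt
        · rw [ih (skew ++ [v]) c g v [(skew.length : Int)]
              (by rw [min?_id_append_singleton skew best v hmin]; congr 1; omega)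
              (by rw [indices_append, indices_nil_of_lt skew best v hmin hlt]; simp)]
          simp only [List.length_append, List.length_singleton]
          push_cast
          rw [if_pos (by omega)]
        · rw [ih (skew ++ [v]) c g best (res ++ [(skew.length : Int)])
              (by rw [min?_id_append_singleton skew best v hmin]; congr 1; omega)
              (by rw [indices_append, hres]; simp [heq])]
          simp only [List.length_append, List.length_singleton]
          push_cast
          rw [if_neg (by omega), if_pos (by omega)]
        · rw [ih (skew ++ [v]) c g best res
              (by rw [min?_id_append_singleton skew best v hmin]; congr 1; omega)
              (by rw [indices_append, hres, if_neg (by omega)]; simp)]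
          simp only [List.length_append, List.length_singleton]
          push_cast
          rw [if_neg (by omega), if_neg (by omega)]

-- ===== VERDICT (by name: the statement is the Claim_ definition above) =====
theorem minimum_skew_spec : Claim_equal_minimum_skew := by
  intro genome _
  unfold Spec_minimum_skew minimum_skew minimum_skew_alt
  dsimp only
  have key := loop_key genome.toList [0] 0 0 0 [0]
    (by decide) (by decide)
  simp only [List.length_singleton, Int.natCast_one, sub_zero] at key
  rw [show ((PySem.List.enumerate (pvA_loop genome.toList [0] 0 0) 0).filterMap
      (fun p => if p.2 = (PySem.List.min? (pvA_loop genome.toList [0] 0 0) (fun x => x)).getD 0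
                then some (PySem.Int.toStr p.1) else none))
    = ((PySem.List.enumerate (pvA_loop genome.toList [0] 0 0) 0).filterMap
      (fun p => if p.2 = (PySem.List.min? (pvA_loop genome.toList [0] 0 0) (fun x => x)).getD 0
                then some p.1 else none)).map PySem.Int.toStr from by
      rw [List.map_filterMap]; congr 1; funext p; split <;> simp]
  rw [key]
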